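-- pv_equiv track=rewrite | github.com/uesenthi/AoC2021 | day_8/solution_1.py | parse_broken_dial
-- ===== SOURCE A (Python) =====
-- def parse_broken_dial(signals, outputs):
--     signal_pattern_lookup = {}
--
--     for signal in signals:
--         if len(signal) == 2:
--             signal_pattern_lookup[str(sorted(signal))] = 1
--         elif len(signal) == 3:
--             signal_pattern_lookup[str(sorted(signal))] = 7
--         elif len(signal) == 4:
--             signal_pattern_lookup[str(sorted(signal))] = 4
--         elif len(signal) == 7:
--             signal_pattern_lookup[str(sorted(signal))] = 8
--
--     easy_bit_values = 0
--     x = list(signal_pattern_lookup.keys())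
--
--     for output in outputs:
--         if str(sorted(output)) in x:
--             easy_bit_values += 1
--
--     return easy_bit_values
-- ===== SOURCE B (Python) =====
-- def parse_broken_dial(signals, outputs):
--     # Invert the indexing: count the outputs by canonical (sorted-chars) form once,
--     # then sum those counts over the distinct unique-length signal canonical forms.
--     out_count = {}
--     for output in outputs:
--         key = tuple(sorted(output))
--         out_count[key] = out_count.get(key, 0) + 1
--     total = 0
--     seen = set()
--     for sig in signals:
--         if len(sig) in (2, 3, 4, 7):
--             key = tuple(sorted(sig))
--             if key not in seen:
--                 seen.add(key)
--                 total += out_count.get(key, 0)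
--     return total
-- ===== Notes on version B (the rewrite author's own statement) =====
-- stated objective: alternative
-- what changed: Inverts the indexing: instead of building a lookup of signal patterns and testing each output against it, B builds a multiset counter of the outputs keyed by sorted characters and makes one pass over the signals, summing the counter entries of the distinct unique-length signal patterns.
import Mathlib
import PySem

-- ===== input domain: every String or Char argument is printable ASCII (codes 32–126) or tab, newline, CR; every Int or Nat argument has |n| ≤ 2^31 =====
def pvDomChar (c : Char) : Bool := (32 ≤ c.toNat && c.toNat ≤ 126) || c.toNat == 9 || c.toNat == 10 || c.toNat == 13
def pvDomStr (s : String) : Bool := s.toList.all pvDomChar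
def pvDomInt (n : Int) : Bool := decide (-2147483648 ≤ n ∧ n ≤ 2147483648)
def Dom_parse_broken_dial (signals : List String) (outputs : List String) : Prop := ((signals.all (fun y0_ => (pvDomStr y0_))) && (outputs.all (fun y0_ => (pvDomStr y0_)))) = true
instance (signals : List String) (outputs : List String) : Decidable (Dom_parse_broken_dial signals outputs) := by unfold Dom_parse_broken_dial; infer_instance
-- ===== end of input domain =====

-- B inverts the indexing: it counts the outputs by sorted-character key once, then sums those
-- counts over the distinct unique-length (2/3/4/7) signal keys in one pass (objective: alternative).


-- ===== PORT A =====
-- Python repr of a single-character string (exact for printable ASCII, tab, newline, CR —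
-- the grader's Dom; ' is double-quoted, \ \t \n \r are backslash-escaped)
def pvCharRepr (c : Char) : List Char :=
  if c = '\'' then ['"', '\'', '"']
  else if c = '\\' then ['\'', '\\', '\\', '\'']
  else if c = '\t' then ['\'', '\\', 't', '\'']
  else if c = '\n' then ['\'', '\\', 'n', '\'']
  else if c = '\r' then ['\'', '\\', 'r', '\'']
  else ['\'', c, '\'']

-- the characters of str(<list of 1-char strings>) after the opening '[' (", "-separated, closed by ']')
def pvListReprBody : List Char → List Char
  | [] => [']']
  | c :: cs =>
    pvCharRepr c ++ (match cs with
      | [] => [']']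
      | _ :: _ => ',' :: ' ' :: pvListReprBody cs)

-- str(sorted(s)) of a Python string s
def pvKey (s : String) : String :=
  String.ofList ('[' :: pvListReprBody (PySem.List.sorted s.toList (fun c => c) false))

def parse_broken_dial (signals : List String) (outputs : List String) : Int :=
  let signal_pattern_lookup : PySem.Dict String Int :=
    signals.foldl (fun d signal =>
      if PySem.Str.len signal = 2 then d.insert (pvKey signal) 1
      else if PySem.Str.len signal = 3 then d.insert (pvKey signal) 7
      else if PySem.Str.len signal = 4 then d.insert (pvKey signal) 4
      else if PySem.Str.len signal = 7 then d.insert (pvKey signal) 8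
      else d) PySem.Dict.empty
  let x : List String := signal_pattern_lookup.keys
  outputs.foldl (fun easy_bit_values output =>
    if pvKey output ∈ x then easy_bit_values + 1 else easy_bit_values) 0

-- ===== PORT B =====
-- tuple(sorted(s)) is modelled as the sorted List Char (Python tuples of 1-char strings
-- compare exactly like these lists do under =)
def parse_broken_dial_alt (signals : List String) (outputs : List String) : Int :=
  let out_count : PySem.Dict (List Char) Int :=
    outputs.foldl (fun d output =>
      let key := PySem.List.sorted output.toList (fun c => c) false
      d.insert key (d.getD key 0 + 1)) PySem.Dict.empty
  let st := signals.foldl (fun (st : Int × PySem.Set (List Char)) signal =>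
      if PySem.Str.len signal ∈ ([2, 3, 4, 7] : List Int) then
        let key := PySem.List.sorted signal.toList (fun c => c) false
        if key ∈ st.2 then st
        else (st.1 + out_count.getD key 0, PySem.Set.add st.2 key)
      else st) ((0 : Int), PySem.Set.empty)
  st.1

-- ===== PRECONDITION & SPEC =====
def Spec_parse_broken_dial (signals : List String) (outputs : List String) (out : Int) : Prop := out = parse_broken_dial_alt signals outputs
instance (signals : List String) (outputs : List String) (out : Int) : Decidable (Spec_parse_broken_dial signals outputs out) := by unfold Spec_parse_broken_dial; infer_instance

-- ===== CLAIM (what is proved, stated in full; the proofs are below) =====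
def Claim_equal_parse_broken_dial : Prop := ∀ (signals : List String) (outputs : List String), Dom_parse_broken_dial signals outputs → Spec_parse_broken_dial signals outputs (parse_broken_dial signals outputs)

-- ===== LEMMAS AND PROOFS =====

def pvCanon (s : String) : List Char := PySem.List.sorted s.toList (fun c => c) false

abbrev pvLenOK (s : String) : Prop := PySem.Str.len s ∈ ([2, 3, 4, 7] : List Int)

-- decoder (proof-only): a left inverse of pvListReprBody, giving its injectivity
def pvUnesc (e : Char) : Option Char :=
  if e = '\\' then some '\\'
  else if e = 't' then some '\t'
  else if e = 'n' then some '\n'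
  else if e = 'r' then some '\r'
  else none

mutual
def pvDecBody : List Char → Option (List Char)
  | [] => none
  | a :: l1 =>
    if a = ']' then (if l1 = [] then some [] else none)
    else if a = '"' then
      match l1 with
      | b :: c2 :: rest => if b = '\'' ∧ c2 = '"' then pvDecCont '\'' rest else none
      | _ => none
    else if a = '\'' then
      match l1 with
      | [] => none
      | b :: l2 =>
        if b = '\\' then
          match l2 with
          | e :: q :: rest => if q = '\'' then (pvUnesc e).bind (fun u => pvDecCont u rest) else none
          | _ => none
        else
          match l2 with
          | q :: rest => if q = '\'' then pvDecCont b rest else none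
          | _ => none
    else none
termination_by l => l.length
def pvDecCont (c : Char) : List Char → Option (List Char)
  | [] => none
  | a :: rest =>
    if a = ']' then (if rest = [] then some [c] else none)
    else if a = ',' then
      match rest with
      | b :: rest2 => if b = ' ' then (pvDecBody rest2).map (c :: ·) else none
      | [] => none
    else none
termination_by l => l.length
end

lemma pvDecBody_charRepr (c : Char) (rest : List Char) :
    pvDecBody (pvCharRepr c ++ rest) = pvDecCont c rest := by
  unfold pvCharRepr
  split_ifs with h1 h2 h3 h4 h5 <;> subst_vars <;> simp [pvDecBody, pvUnesc, *]

lemma pvDecBody_body (l : List Char) : pvDecBody (pvListReprBody l) = some l := by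
  induction l with
  | nil => simp [pvListReprBody, pvDecBody]
  | cons c cs ih =>
    cases cs with
    | nil => simp [pvListReprBody, pvDecBody_charRepr, pvDecCont]
    | cons c2 cs' =>
      have hb : pvListReprBody (c :: c2 :: cs')
          = pvCharRepr c ++ (',' :: ' ' :: pvListReprBody (c2 :: cs')) := rfl
      rw [hb, pvDecBody_charRepr]
      simp [pvDecCont, ih]

lemma pvListReprBody_inj {l1 l2 : List Char} (h : pvListReprBody l1 = pvListReprBody l2) :
    l1 = l2 := by
  have h1 := pvDecBody_body l1
  rw [h, pvDecBody_body] at h1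
  exact (Option.some.inj h1).symm

lemma pvKey_eq_iff (s t : String) : pvKey s = pvKey t ↔ pvCanon s = pvCanon t := by
  constructor
  · intro h
    have hl := congrArg String.toList h
    simp only [pvKey, String.toList_ofList, List.cons.injEq, true_and] at hl
    exact pvListReprBody_inj hl
  · intro h; simp [pvKey, pvCanon] at h ⊢; rw [h]

-- the step of A's dict-building loop; inserts pvKey s exactly when len s ∈ {2,3,4,7}
def pvStepA (d : PySem.Dict String Int) (signal : String) : PySem.Dict String Int :=
  if PySem.Str.len signal = 2 then d.insert (pvKey signal) 1
  else if PySem.Str.len signal = 3 then d.insert (pvKey signal) 7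
  else if PySem.Str.len signal = 4 then d.insert (pvKey signal) 4
  else if PySem.Str.len signal = 7 then d.insert (pvKey signal) 8
  else d

lemma mem_keys_pvStepA (d : PySem.Dict String Int) (s : String) (k : String) :
    k ∈ (pvStepA d s).keys ↔ (pvLenOK s ∧ k = pvKey s) ∨ k ∈ d.keys := by
  unfold pvStepA pvLenOK
  split_ifs with h1 h2 h3 h4 <;> simp [PySem.Dict.mem_keys_insert, *] <;> tauto

lemma mem_keys_loopA (signals : List String) (d : PySem.Dict String Int) (k : String) :
    k ∈ (signals.foldl pvStepA d).keys ↔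
      (∃ s ∈ signals, pvLenOK s ∧ k = pvKey s) ∨ k ∈ d.keys := by
  induction signals generalizing d with
  | nil => simp
  | cons s ss ih =>
    simp only [List.foldl_cons, ih, mem_keys_pvStepA, List.mem_cons]
    constructor
    · rintro (⟨t, ht, h⟩ | (h | h))
      · exact Or.inl ⟨t, Or.inr ht, h⟩
      · exact Or.inl ⟨s, Or.inl rfl, h⟩
      · exact Or.inr h
    · rintro (⟨t, (rfl | ht), h⟩ | h)
      · exact Or.inr (Or.inl h)
      · exact Or.inl ⟨t, ht, h⟩
      · exact Or.inr (Or.inr h)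

-- A counts the outputs whose canonical form equals that of some unique-length signal
lemma pvA_eq_countP (signals outputs : List String) :
    parse_broken_dial signals outputs
      = ((outputs.countP (fun o =>
          decide (∃ s ∈ signals, pvLenOK s ∧ pvCanon o = pvCanon s))) : Int) := by
  unfold parse_broken_dial
  rw [show (fun (d : PySem.Dict String Int) signal =>
      if PySem.Str.len signal = 2 then d.insert (pvKey signal) 1
      else if PySem.Str.len signal = 3 then d.insert (pvKey signal) 7
      else if PySem.Str.len signal = 4 then d.insert (pvKey signal) 4
      else if PySem.Str.len signal = 7 then d.insert (pvKey signal) 8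
      else d) = pvStepA from rfl]
  rw [PySem.List.foldl_ite_add_one]
  rw [zero_add]
  congr 1
  apply List.countP_congr
  intro o _
  simp only [decide_eq_true_eq]
  rw [mem_keys_loopA]
  simp only [PySem.Dict.keys_empty, List.not_mem_nil, or_false]
  constructor
  · rintro ⟨s, hs, hl, hk⟩; exact ⟨s, hs, hl, (pvKey_eq_iff o s).mp hk⟩
  · rintro ⟨s, hs, hl, hk⟩; exact ⟨s, hs, hl, (pvKey_eq_iff o s).mpr hk⟩

-- the step of B's summing loop, with the counter abstracted as a lookup function c
def pvStepB (c : List Char → Int) (st : Int × PySem.Set (List Char)) (signal : String) :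
    Int × PySem.Set (List Char) :=
  if PySem.Str.len signal ∈ ([2, 3, 4, 7] : List Int) then
    (if pvCanon signal ∈ st.2 then st
     else (st.1 + c (pvCanon signal), PySem.Set.add st.2 (pvCanon signal)))
  else st

lemma pvStepB_skip (c : List Char → Int) (st : Int × PySem.Set (List Char)) (s : String)
    (hl : ¬ pvLenOK s) : pvStepB c st s = st := by
  unfold pvStepB; unfold pvLenOK at hl; rw [if_neg hl]

lemma pvStepB_old (c : List Char → Int) (st : Int × PySem.Set (List Char)) (s : String)
    (hl : pvLenOK s) (hm : pvCanon s ∈ st.2) : pvStepB c st s = st := by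
  unfold pvStepB; unfold pvLenOK at hl; rw [if_pos hl, if_pos hm]

lemma pvStepB_new (c : List Char → Int) (st : Int × PySem.Set (List Char)) (s : String)
    (hl : pvLenOK s) (hm : pvCanon s ∉ st.2) :
    pvStepB c st s = (st.1 + c (pvCanon s), PySem.Set.add st.2 (pvCanon s)) := by
  unfold pvStepB; unfold pvLenOK at hl; rw [if_pos hl, if_neg hm]

-- counting a disjunction of disjoint properties splits
lemma pvCountSplit (l : List String) (p q : String → Prop)
    [DecidablePred p] [DecidablePred q] (h : ∀ a, ¬(p a ∧ q a)) :
    l.countP (fun a => decide (p a ∨ q a))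
      = l.countP (fun a => decide (p a)) + l.countP (fun a => decide (q a)) := by
  induction l with
  | nil => simp
  | cons a l ih =>
    simp only [List.countP_cons, ih]
    by_cases hp : p a <;> by_cases hq : q a
    · exact absurd ⟨hp, hq⟩ (h a)
    · simp [hp, hq]
      omega
    · simp [hp, hq]
      omega
    · simp [hp, hq]

lemma pvB_loop (os : List String) (sigs : List String)
    (c : List Char → Int)
    (hc : ∀ k, c k = ((os.countP (fun o => decide (pvCanon o = k))) : Int))
    (seen : PySem.Set (List Char)) (t : Int) :
    (sigs.foldl (pvStepB c) (t, seen)).1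
      = t + ((os.countP (fun o =>
          decide (pvCanon o ∉ seen ∧ ∃ s ∈ sigs, pvLenOK s ∧ pvCanon o = pvCanon s))) : Int) := by
  induction sigs generalizing seen t with
  | nil => simp
  | cons s ss ih =>
    simp only [List.foldl_cons]
    by_cases hl : pvLenOK s
    · by_cases hm : pvCanon s ∈ seen
      · rw [pvStepB_old c (t, seen) s hl hm, ih seen t]
        congr 2
        apply List.countP_congr
        intro o _
        simp only [decide_eq_true_eq]
        simp only [List.mem_cons]
        constructor
        · rintro ⟨hns, x, hx, hlx, he⟩; exact ⟨hns, x, Or.inr hx, hlx, he⟩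
        · rintro ⟨hns, x, hx, hlx, he⟩
          refine ⟨hns, x, ?_, hlx, he⟩
          rcases hx with rfl | hx
          · exact absurd (he ▸ hm) hns
          · exact hx
      · rw [pvStepB_new c (t, seen) s hl hm,
          ih (PySem.Set.add seen (pvCanon s)) (t + c (pvCanon s)), hc (pvCanon s)]
        have hsplit := pvCountSplit os
          (fun o => pvCanon o = pvCanon s)
          (fun o => pvCanon o ∉ PySem.Set.add seen (pvCanon s) ∧
            ∃ x ∈ ss, pvLenOK x ∧ pvCanon o = pvCanon x)
          (by
            rintro o ⟨he, hn, -⟩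
            exact hn (by rw [PySem.Set.mem_add]; exact Or.inr he))
        have hcongr : os.countP (fun o =>
              decide (pvCanon o ∉ seen ∧ ∃ x ∈ s :: ss, pvLenOK x ∧ pvCanon o = pvCanon x))
            = os.countP (fun o => decide (pvCanon o = pvCanon s ∨
              (pvCanon o ∉ PySem.Set.add seen (pvCanon s) ∧
                ∃ x ∈ ss, pvLenOK x ∧ pvCanon o = pvCanon x))) := by
          apply List.countP_congr
          intro o _
          simp only [decide_eq_true_eq]
          simp only [List.mem_cons]
          constructor
          · rintro ⟨hns, x, hx, hlx, he⟩
            by_cases hcs : pvCanon o = pvCanon s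
            · exact Or.inl hcs
            · refine Or.inr ⟨?_, x, ?_, hlx, he⟩
              · rw [PySem.Set.mem_add]; exact not_or.mpr ⟨hns, hcs⟩
              · rcases hx with rfl | hx
                · exact absurd he hcs
                · exact hx
          · rintro (hcs | ⟨hna, x, hx, hlx, he⟩)
            · exact ⟨fun h => hm (hcs ▸ h), s, Or.inl rfl, by simpa using hl, hcs⟩
            · rw [PySem.Set.mem_add] at hna
              exact ⟨(not_or.mp hna).1, x, Or.inr hx, hlx, he⟩
        rw [hcongr, hsplit]
        push_cast
        ring
    · rw [pvStepB_skip c (t, seen) s hl, ih seen t]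
      congr 2
      apply List.countP_congr
      intro o _
      simp only [decide_eq_true_eq]
      simp only [List.mem_cons]
      constructor
      · rintro ⟨hns, x, hx, hlx, he⟩; exact ⟨hns, x, Or.inr hx, hlx, he⟩
      · rintro ⟨hns, x, hx, hlx, he⟩
        refine ⟨hns, x, ?_, hlx, he⟩
        rcases hx with rfl | hx
        · exact absurd (by simpa using hlx) hl
        · exact hx

-- B's counter looked up at k holds the number of outputs with canonical form k
lemma pvCounter_getD_gen (outputs : List String) (d : PySem.Dict (List Char) Int) (k : List Char) :
    (outputs.foldl (fun d output =>
        d.insert (pvCanon output) (d.getD (pvCanon output) 0 + 1)) d).getD k 0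
      = d.getD k 0 + ((outputs.countP (fun o => decide (pvCanon o = k))) : Int) := by
  induction outputs generalizing d with
  | nil => simp
  | cons o os ih =>
    simp only [List.foldl_cons, ih, List.countP_cons]
    rw [PySem.Dict.getD_insert]
    by_cases h : k = pvCanon o
    · subst h
      simp
      omega
    · have h' : ¬ (pvCanon o = k) := fun e => h e.symm
      rw [if_neg h, if_neg (by simpa using h')]
      push_cast
      ring

lemma pvCounter_getD (outputs : List String) (k : List Char) :
    (outputs.foldl (fun d output =>
        let key := PySem.List.sorted output.toList (fun c => c) false
        d.insert key (d.getD key 0 + 1)) PySem.Dict.empty).getD k 0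
      = ((outputs.countP (fun o => decide (pvCanon o = k))) : Int) := by
  rw [show (fun (d : PySem.Dict (List Char) Int) output =>
        let key := PySem.List.sorted output.toList (fun c => c) false
        d.insert key (d.getD key 0 + 1))
      = (fun (d : PySem.Dict (List Char) Int) output =>
          d.insert (pvCanon output) (d.getD (pvCanon output) 0 + 1)) from rfl]
  rw [pvCounter_getD_gen, PySem.Dict.getD_empty, zero_add]

-- the summing loop with the port's literal step function, counter abstracted as oc
lemma pvB_loop' (os sigs : List String) (oc : PySem.Dict (List Char) Int)
    (hoc : ∀ k, oc.getD k 0 = ((os.countP (fun o => decide (pvCanon o = k))) : Int))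
    (seen : PySem.Set (List Char)) (t : Int) :
    (sigs.foldl (fun (st : Int × PySem.Set (List Char)) signal =>
        if PySem.Str.len signal ∈ ([2, 3, 4, 7] : List Int) then
          let key := PySem.List.sorted signal.toList (fun c => c) false
          if key ∈ st.2 then st
          else (st.1 + oc.getD key 0, PySem.Set.add st.2 key)
        else st) (t, seen)).1
      = t + ((os.countP (fun o =>
          decide (pvCanon o ∉ seen ∧ ∃ s ∈ sigs, pvLenOK s ∧ pvCanon o = pvCanon s))) : Int) := by
  rw [show (fun (st : Int × PySem.Set (List Char)) signal =>
        if PySem.Str.len signal ∈ ([2, 3, 4, 7] : List Int) then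
          let key := PySem.List.sorted signal.toList (fun c => c) false
          if key ∈ st.2 then st
          else (st.1 + oc.getD key 0, PySem.Set.add st.2 key)
        else st) = pvStepB (fun k => oc.getD k 0) from rfl]
  exact pvB_loop os sigs _ (fun k => hoc k) seen t

-- ===== VERDICT (by name: the statement is the Claim_ definition above) =====
theorem parse_broken_dial_spec : Claim_equal_parse_broken_dial := by
  intro signals outputs _
  unfold Spec_parse_broken_dial parse_broken_dial_alt
  simp only []
  rw [pvA_eq_countP,
    pvB_loop' outputs signals _ (fun k => pvCounter_getD outputs k) PySem.Set.empty 0,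
    zero_add]
  congr 1
  apply List.countP_congr
  intro o _
  simp only [decide_eq_true_eq]
  constructor
  · intro h; exact ⟨List.not_mem_nil, h⟩
  · rintro ⟨-, h⟩; exact h
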